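-- pv_equiv track=rewrite | github.com/noirfate/PyRIT | pyrit/pyrit_tester.py | analyze_conversations
-- ===== SOURCE A (Python) =====
-- def analyze_conversations(conversations):
--     success = []
--     failed = []
--     denied = []
--     for dialog in conversations:
--         for content in dialog[1]:
--             if content["role"] == 'assistant':
--                 if content["response_error"] != "none":
--                     denied.append(dialog[1])
--                     break
--                 elif content["score_value"] == "True":
--                     success.append(dialog[1])
--                     break
--                 elif content["score_value"] == "False":
--                     failed.append(dialog[1])
--                     break
--
--     return success, failed, denied
-- ===== SOURCE B (Python) =====
-- def analyze_conversations(conversations):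
--     def _verdict(contents):
--         hit = next((c for c in contents
--                     if c["role"] == 'assistant'
--                     and (c["response_error"] != "none"
--                          or c["score_value"] in ("True", "False"))), None)
--         if hit is None:
--             return None
--         if hit["response_error"] != "none":
--             return "denied"
--         return "success" if hit["score_value"] == "True" else "failed"
--
--     success = [d[1] for d in conversations if _verdict(d[1]) == "success"]
--     failed = [d[1] for d in conversations if _verdict(d[1]) == "failed"]
--     denied = [d[1] for d in conversations if _verdict(d[1]) == "denied"]
--     return success, failed, denied
-- ===== Notes on version B (the rewrite author's own statement) =====
-- stated objective: simpler
-- what changed: Replaces the single pass with three mutable bucket lists and an inner break-loop by a pure per-dialog verdict function (next() over a generator finding the first decisive assistant message) and three filtering comprehensions, one per bucket.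
import Mathlib
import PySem

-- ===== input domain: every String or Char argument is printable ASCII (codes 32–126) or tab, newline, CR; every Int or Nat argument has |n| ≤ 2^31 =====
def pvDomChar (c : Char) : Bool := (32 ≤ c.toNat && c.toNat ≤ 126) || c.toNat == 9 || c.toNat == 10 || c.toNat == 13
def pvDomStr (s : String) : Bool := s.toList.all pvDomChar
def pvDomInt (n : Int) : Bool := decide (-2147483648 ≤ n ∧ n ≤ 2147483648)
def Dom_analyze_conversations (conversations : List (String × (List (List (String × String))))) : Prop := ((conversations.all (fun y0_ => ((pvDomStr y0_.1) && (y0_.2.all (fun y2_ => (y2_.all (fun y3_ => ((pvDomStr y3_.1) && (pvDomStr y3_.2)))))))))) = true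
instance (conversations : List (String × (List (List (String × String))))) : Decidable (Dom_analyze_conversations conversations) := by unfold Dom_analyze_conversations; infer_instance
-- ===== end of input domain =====

-- B replaces A's single pass with mutable buckets and an inner break-loop by a pure
-- per-dialog verdict function plus three filtering comprehensions (objective: simpler).


-- first-match association-list lookup = Python dict lookup under the type convention
def pvGet (c : List (String × String)) (k : String) : String :=
  (c.lookup k).getD ""

-- ===== PORT A =====
-- inner 'for content in dialog[1]' loop with break; d1 is dialog[1]
def pvLoopA (d1 : List (List (String × String))) :
    List (List (String × String)) →
    (List (List (List (String × String)))) × (List (List (List (String × String)))) × (List (List (List (String × String)))) →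
    (List (List (List (String × String)))) × (List (List (List (String × String)))) × (List (List (List (String × String))))
  | [], acc => acc
  | c :: rest, (s, f, dn) =>
    if pvGet c "role" = "assistant" then
      if pvGet c "response_error" ≠ "none" then (s, f, dn ++ [d1])
      else if pvGet c "score_value" = "True" then (s ++ [d1], f, dn)
      else if pvGet c "score_value" = "False" then (s, f ++ [d1], dn)
      else pvLoopA d1 rest (s, f, dn)
    else pvLoopA d1 rest (s, f, dn)

def analyze_conversations (conversations : List (String × (List (List (String × String))))) : (List (List (List (String × String)))) × (List (List (List (String × String)))) × (List (List (List (String × String)))) :=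
  conversations.foldl (fun acc dialog => pvLoopA dialog.2 dialog.2 acc) ([], [], [])

-- ===== PORT B =====
-- next((c for c in contents if …), None)
def pvFindHit : List (List (String × String)) → Option (List (String × String))
  | [] => none
  | c :: rest =>
    if pvGet c "role" = "assistant" ∧
        (pvGet c "response_error" ≠ "none" ∨ pvGet c "score_value" = "True" ∨ pvGet c "score_value" = "False") then
      some c
    else pvFindHit rest

def pvVerdict (contents : List (List (String × String))) : Option String :=
  match pvFindHit contents with
  | none => none
  | some c =>
    if pvGet c "response_error" ≠ "none" then some "denied"
    else if pvGet c "score_value" = "True" then some "success"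
    else some "failed"

def analyze_conversations_alt (conversations : List (String × (List (List (String × String))))) : (List (List (List (String × String)))) × (List (List (List (String × String)))) × (List (List (List (String × String)))) :=
  ((conversations.filter (fun d => pvVerdict d.2 == some "success")).map (·.2),
   (conversations.filter (fun d => pvVerdict d.2 == some "failed")).map (·.2),
   (conversations.filter (fun d => pvVerdict d.2 == some "denied")).map (·.2))

-- ===== PRECONDITION & SPEC =====
-- Pre_ excludes inputs where Python A raises KeyError: a message without a "role" key, an
-- assistant message without "response_error", or an assistant message with response_error
-- "none" but no "score_value". (It is stated for every message of every dialog, so it is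
-- slightly stronger than A's exact non-raising set, which leaves messages after a break
-- unconstrained.)
def pvOkContent (c : List (String × String)) : Bool :=
  (c.lookup "role").isSome &&
  (if (c.lookup "role").getD "" = "assistant" then
    (c.lookup "response_error").isSome &&
    (if (c.lookup "response_error").getD "" = "none" then (c.lookup "score_value").isSome else true)
  else true)

def Pre_analyze_conversations (conversations : List (String × (List (List (String × String))))) : Prop :=
  (conversations.all (fun d => d.2.all pvOkContent)) = true

instance (conversations : List (String × (List (List (String × String))))) : Decidable (Pre_analyze_conversations conversations) := by unfold Pre_analyze_conversations; infer_instance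

def pvWitness_analyze_conversations : (List (String × (List (List (String × String))))) :=
  [("conv1", [[("role", "assistant"), ("response_error", "none"), ("score_value", "True")]])]

def Spec_analyze_conversations (conversations : List (String × (List (List (String × String))))) (out : (List (List (List (String × String)))) × (List (List (List (String × String)))) × (List (List (List (String × String))))) : Prop := out = analyze_conversations_alt conversations
instance (conversations : List (String × (List (List (String × String))))) (out : (List (List (List (String × String)))) × (List (List (List (String × String)))) × (List (List (List (String × String))))) : Decidable (Spec_analyze_conversations conversations out) := by unfold Spec_analyze_conversations; infer_instance

-- ===== CLAIM (what is proved, stated in full; the proofs are below) =====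
def Claim_equal_analyze_conversations : Prop := ∀ (conversations : List (String × (List (List (String × String))))), Dom_analyze_conversations conversations → Pre_analyze_conversations conversations → Spec_analyze_conversations conversations (analyze_conversations conversations)

-- ===== LEMMAS AND PROOFS =====

-- A's inner loop appends dialog[1] to the bucket named by B's verdict
lemma pvLoopA_eq_verdict (d1 : List (List (String × String)))
    (contents : List (List (String × String)))
    (s f dn : List (List (List (String × String)))) :
    pvLoopA d1 contents (s, f, dn) =
      (s ++ (if pvVerdict contents == some "success" then [d1] else []),
       f ++ (if pvVerdict contents == some "failed" then [d1] else []),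
       dn ++ (if pvVerdict contents == some "denied" then [d1] else [])) := by
  induction contents generalizing s f dn with
  | nil => simp [pvLoopA, pvVerdict, pvFindHit]
  | cons c rest ih =>
    simp only [pvLoopA, pvVerdict, pvFindHit]
    by_cases hr : pvGet c "role" = "assistant"
    · by_cases he : pvGet c "response_error" = "none"
      · by_cases ht : pvGet c "score_value" = "True"
        · simp [hr, he, ht]
        · by_cases hf : pvGet c "score_value" = "False"
          · simp [hr, he, hf]
          · simp [hr, he, ht, hf, ih, pvVerdict]
      · simp [hr, he]
    · simp [hr, ih, pvVerdict]

lemma foldl_eq_filters (conversations : List (String × (List (List (String × String)))))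
    (s f dn : List (List (List (String × String)))) :
    conversations.foldl (fun acc dialog => pvLoopA dialog.2 dialog.2 acc) (s, f, dn) =
      (s ++ (conversations.filter (fun d => pvVerdict d.2 == some "success")).map (·.2),
       f ++ (conversations.filter (fun d => pvVerdict d.2 == some "failed")).map (·.2),
       dn ++ (conversations.filter (fun d => pvVerdict d.2 == some "denied")).map (·.2)) := by
  induction conversations generalizing s f dn with
  | nil => simp
  | cons d rest ih =>
    simp only [List.foldl_cons, pvLoopA_eq_verdict, ih, List.filter_cons]
    by_cases hs : pvVerdict d.2 == some "success" <;>
      by_cases hf : pvVerdict d.2 == some "failed" <;>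
        by_cases hd : pvVerdict d.2 == some "denied" <;>
          simp_all

-- ===== VERDICT (by name: the statement is the Claim_ definition above) =====
theorem analyze_conversations_spec : Claim_equal_analyze_conversations := by
  intro conversations _ _
  show analyze_conversations conversations = analyze_conversations_alt conversations
  simp [analyze_conversations, analyze_conversations_alt, foldl_eq_filters]
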